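-- pv_equiv track=rewrite | github.com/pisitponjanton/IT-KMITL | PSCP-Y-1/[Midterm 2024]/Scientific Notation.py | numin2
-- ===== SOURCE A (Python) =====
-- def numin2(num):
--     """Scientific Notation"""
--     t=""
--     n=0
--     s=-1
--     num1=""
--     dd="."
--     for i in num:
--         if i==".":
--             n=1
--         if i!="." and not n:
--             s+=1
--         if i!=".":
--             num1+=i
--     if num1[0] == "0":
--         s=1
--         n=0
--         t="-"
--         for i in num1[1:]:
--             if i=="0" and not n:
--                 s+=1
--             else:
--                 n=1
--         num1=num1[s:]
--         if len(num1)<=1: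
--             dd=""
--     return t,dd,num1,s
-- ===== SOURCE B (Python) =====
-- def numin2(num):
--     """Scientific Notation — single backwards pass (a right fold): walking the
--     string right-to-left maintains at once the dotless string d, the distance p
--     to the first dot (None if none seen yet), and the leading-zero count z with
--     the zero-stripped suffix m, so no forward flag bookkeeping is needed."""
--     d = ''
--     p = None      # chars before the first dot, if any dot lies to the right... i.e. left-distance
--     z, m = 0, ''  # leading zeros of d, and d without them
--     for c in reversed(num):
--         if c == '.':
--             p = 0
--         else:
--             d = c + d
--             if p is not None:
--                 p += 1
--             if c == '0':
--                 z += 1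
--             else:
--                 z, m = 0, d
--     if d[0] == '0':
--         return '-', ('.' if len(m) > 1 else ''), m, z
--     return '', '.', d, (len(d) - 1 if p is None else p - 1)
-- ===== Notes on version B (the rewrite author's own statement) =====
-- stated objective: alternative
-- what changed: A makes two forward passes with mutable flags (a dot flag plus counter, then a zero flag plus counter and a slice); B is one backwards pass, a right fold over the reversed string whose state (dotless string, distance to first dot as an Option, leading-zero count, zero-stripped suffix) yields all four components directly with no flags and no slicing.
import Mathlib
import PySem

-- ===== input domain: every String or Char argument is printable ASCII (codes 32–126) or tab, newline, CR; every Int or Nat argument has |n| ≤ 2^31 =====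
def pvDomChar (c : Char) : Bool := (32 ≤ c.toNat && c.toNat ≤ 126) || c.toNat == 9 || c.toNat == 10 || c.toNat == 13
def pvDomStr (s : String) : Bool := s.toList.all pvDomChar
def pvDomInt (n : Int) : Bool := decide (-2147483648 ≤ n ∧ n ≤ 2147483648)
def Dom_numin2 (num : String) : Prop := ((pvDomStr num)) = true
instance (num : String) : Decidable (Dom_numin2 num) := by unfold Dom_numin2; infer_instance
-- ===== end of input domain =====

-- B replaces A's two forward flag-driven loops by one backwards pass (a right fold)
-- whose state carries the dotless string, first-dot distance, and zero strip (alternative).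

-- ===== PORT A =====
-- body of A's first loop (state n, s, num1; the three statements in order)
def numin2Step1 (st : Bool × Int × List Char) (i : Char) : Bool × Int × List Char :=
  let n := if i = '.' then true else st.1
  let s := if i ≠ '.' ∧ n = false then st.2.1 + 1 else st.2.1
  let num1 := if i ≠ '.' then st.2.2 ++ [i] else st.2.2
  (n, s, num1)

-- body of A's second loop (state n, s)
def numin2Step2 (st : Bool × Int) (i : Char) : Bool × Int :=
  if i = '0' ∧ st.1 = false then (st.1, st.2 + 1) else (true, st.2)

def numin2 (num : String) : String × String × String × Int :=
  let st := num.toList.foldl numin2Step1 (false, -1, ([] : List Char))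
  let s := st.2.1
  let num1 := st.2.2
  if PySem.List.pyGet? num1 0 = some '0' then      -- num1[0] == "0" (raises IndexError on empty num1: excluded by Pre_)
    let st2 := (PySem.List.slice num1 (some 1) none).foldl numin2Step2 (false, (1 : Int))
    let s2 := st2.2
    let num1' := PySem.List.slice num1 (some s2) none
    let dd := if num1'.length ≤ 1 then "" else "."
    ("-", dd, String.ofList num1', s2)
  else
    ("", ".", String.ofList num1, s)

-- ===== PORT B =====
-- body of B's single backwards pass (state d, p, z, m), folded from the right
def altStep (c : Char) (st : List Char × Option Nat × Nat × List Char) :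
    List Char × Option Nat × Nat × List Char :=
  if c = '.' then (st.1, some 0, st.2.2.1, st.2.2.2)
  else
    let d := c :: st.1
    let p := st.2.1.map (· + 1)
    if c = '0' then (d, p, st.2.2.1 + 1, st.2.2.2) else (d, p, 0, d)

def numin2_alt (num : String) : String × String × String × Int :=
  let st := num.toList.foldr altStep ([], none, 0, ([] : List Char))
  let d := st.1
  if PySem.List.pyGet? d 0 = some '0' then         -- d[0] == '0' (raises IndexError on empty d: excluded by Pre_)
    ("-", if 1 < st.2.2.2.length then "." else "", String.ofList st.2.2.2, (st.2.2.1 : Int))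
  else
    let s : Int :=
      match st.2.1 with
      | none => (d.length : Int) - 1
      | some p => (p : Int) - 1
    ("", ".", String.ofList d, s)

-- ===== PRECONDITION & SPEC =====
-- Pre_ excludes exactly the strings with no non-dot character (all-dot or empty), on which A raises IndexError.
def Pre_numin2 (num : String) : Prop := num.toList.filter (fun c => c ≠ '.') ≠ []
instance (num : String) : Decidable (Pre_numin2 num) := by unfold Pre_numin2; infer_instance
def pvWitness_numin2 : String := "0.025"

def Spec_numin2 (num : String) (out : String × String × String × Int) : Prop := out = numin2_alt num
instance (num : String) (out : String × String × String × Int) : Decidable (Spec_numin2 num out) := by unfold Spec_numin2; infer_instance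

-- ===== CLAIM (what is proved, stated in full; the proofs are below) =====
def Claim_equal_numin2 : Prop := ∀ (num : String), Dom_numin2 num → Pre_numin2 num → Spec_numin2 num (numin2 num)

-- ===== LEMMAS AND PROOFS =====

-- A's first loop, once the dot flag is set: s frozen, num1 keeps collecting non-dots
theorem loopA_true (l : List Char) (s : Int) (acc : List Char) :
    l.foldl numin2Step1 (true, s, acc) = (true, s, acc ++ l.filter (fun c => c ≠ '.')) := by
  induction l generalizing acc with
  | nil => simp
  | cons c t ih =>
    by_cases hc : c = '.' <;>
      simp [List.foldl_cons, numin2Step1, hc, ih]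

-- A's first loop from the unset flag: s counts the chars before the first dot, num1 collects non-dots
theorem loopA_false (l : List Char) (s : Int) (acc : List Char) :
    l.foldl numin2Step1 (false, s, acc)
    = (l.contains '.', s + ((l.takeWhile (fun c => c ≠ '.')).length : Int),
       acc ++ l.filter (fun c => c ≠ '.')) := by
  induction l generalizing s acc with
  | nil => simp
  | cons c t ih =>
    by_cases hc : c = '.'
    · simp [List.foldl_cons, numin2Step1, hc, loopA_true]
    · simp only [List.foldl_cons]
      rw [show numin2Step1 (false, s, acc) c = (false, s + 1, acc ++ [c]) by
        simp [numin2Step1, hc]]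
      simp [ih, hc]
      exact ⟨fun h => absurd (Eq.symm h) hc, by ring⟩

-- A's second loop, flag set: state frozen
theorem loopB_true (l : List Char) (s : Int) :
    l.foldl numin2Step2 (true, s) = (true, s) := by
  induction l with
  | nil => rfl
  | cons c t ih => simp [List.foldl_cons, numin2Step2, ih]

-- A's second loop from the unset flag: s counts the leading zeros
theorem loopB_false (l : List Char) (s : Int) :
    l.foldl numin2Step2 (false, s)
    = (!(l.all (fun c => decide (c = '0'))), s + ((l.takeWhile (fun c => c = '0')).length : Int)) := by
  induction l generalizing s with
  | nil => simp
  | cons c t ih =>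
    by_cases hc : c = '0'
    · rw [List.foldl_cons, show numin2Step2 (false, s) c = (false, s + 1) by simp [numin2Step2, hc]]
      simp [ih, hc]
      ring
    · rw [List.foldl_cons, show numin2Step2 (false, s) c = (true, s) by simp [numin2Step2, hc]]
      simp [loopB_true, hc]

-- B's right fold characterized: dotless string, first-dot distance, zero strip
theorem foldB_char (l : List Char) :
    l.foldr altStep ([], none, 0, ([] : List Char))
    = (l.filter (fun c => c ≠ '.'),
       if l.contains '.' then some ((l.takeWhile (fun c => c ≠ '.')).length) else none,
       ((l.filter (fun c => c ≠ '.')).takeWhile (fun c => c = '0')).length,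
       (l.filter (fun c => c ≠ '.')).dropWhile (fun c => c = '0')) := by
  induction l with
  | nil => rfl
  | cons c t ih =>
    rw [List.foldr_cons, ih]
    by_cases hc : c = '.'
    · simp [altStep, hc]
    · have h0 : ¬('.' = c) := fun h => hc h.symm
      by_cases hz : c = '0'
      · subst hz
        by_cases hd : '.' ∈ t <;>
          simp [altStep, hc, h0, hd]
      · by_cases hd : '.' ∈ t <;>
          simp [altStep, hc, h0, hz, hd]

-- dropWhile as a drop of the takeWhile length
theorem dropWhile_eq_drop_len {α : Type} (p : α → Bool) (l : List α) :
    l.dropWhile p = l.drop ((l.takeWhile p).length) := by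
  induction l with
  | nil => rfl
  | cons c t ih =>
    by_cases hc : p c <;> simp [hc, ih]

-- ===== VERDICT (by name: the statement is the Claim_ definition above) =====
theorem numin2_spec : Claim_equal_numin2 := by
  intro num _ hpre
  unfold Pre_numin2 at hpre
  unfold Spec_numin2 numin2 numin2_alt
  simp only [loopA_false, List.nil_append, foldB_char]
  cases hF : num.toList.filter (fun c => c ≠ '.') with
  | nil => exact absurd hF hpre
  | cons c rest =>
    simp only [PySem.List.pyGet?_zero_cons, Option.some.injEq]
    by_cases hc : c = '0'
    · subst hc
      simp only [PySem.List.slice_from_one, List.tail_cons, loopB_false]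
      have h1 : (1 : Int) + ((rest.takeWhile (fun c => c = '0')).length : Int)
          = (((1 + (rest.takeWhile (fun c => c = '0')).length : Nat) : Int)) := by push_cast; ring
      simp only [h1, PySem.List.slice_from_natCast]
      have h2 : ('0' :: rest).drop (1 + (rest.takeWhile (fun c => c = '0')).length)
          = rest.drop ((rest.takeWhile (fun c => c = '0')).length) := by
        rw [Nat.add_comm, List.drop_succ_cons]
      have h3 : ('0' :: rest).dropWhile (fun c => c = '0')
          = rest.drop ((rest.takeWhile (fun c => c = '0')).length) := by
        rw [List.dropWhile_cons]
        simp only [decide_true, if_pos]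
        exact dropWhile_eq_drop_len _ rest
      have h4 : (('0' :: rest).takeWhile (fun c => c = '0')).length
          = 1 + (rest.takeWhile (fun c => c = '0')).length := by
        rw [List.takeWhile_cons]; simp [Nat.add_comm]
      simp only [h2, h3, h4]
      refine Prod.ext rfl (Prod.ext ?_ (Prod.ext rfl (by push_cast; ring)))
      split_ifs with ha hb <;> first | rfl | omega
    · simp only [if_neg hc]
      refine Prod.ext rfl (Prod.ext rfl (Prod.ext rfl ?_))
      by_cases hd : num.toList.contains '.'
      · simp only [hd, if_pos]; push_cast; ring
      · have hall : ∀ x ∈ num.toList, x ≠ '.' := by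
          intro x hx he; exact hd (List.contains_iff_mem.mpr (he ▸ hx))
        have htw : num.toList.takeWhile (fun c => c ≠ '.') = num.toList := by
          rw [List.takeWhile_eq_self_iff]; intro x hx; simpa using hall x hx
        have hfl : num.toList.filter (fun c => c ≠ '.') = num.toList := by
          rw [List.filter_eq_self]; intro x hx; simpa using hall x hx
        simp only [hd, ← hF, hfl, htw]
        simp only [Bool.false_eq_true, if_false]
        omega
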